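-- pv_equiv track=rewrite | github.com/csubhasundar/CodingPractice-Hacktoberfest22 | python/primeMailRead.py | primeMailRead
-- ===== SOURCE A (Python) =====
-- def primeMailRead(numberofMails):
--     count=0
--     renumbering=1
--     while(numberofMails>1):
--         for num in range(1,numberofMails+1):
--             if num>1:
--                 for i in range(2,num):
--                     if(num%i==0):
--                         break
--                 else:
--                     count=count+1
--
--         numberofMails=numberofMails-count;
--         renumbering=renumbering+1
--         count=0
--     return renumbering
-- ===== SOURCE B (Python) =====
-- def primeMailRead(numberofMails):
--     n = numberofMails
--     if n <= 1:
--         return 1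
--     # prefix prime-count table built once: pi[k] = number of primes <= k
--     pi = [0, 0]
--     cnt = 0
--     for k in range(2, n + 1):
--         is_p = True
--         i = 2
--         while i * i <= k:
--             if k % i == 0:
--                 is_p = False
--                 break
--             i += 1
--         if is_p:
--             cnt += 1
--         pi.append(cnt)
--     renumbering = 1
--     while n > 1:
--         n = n - pi[n]
--         renumbering += 1
--     return renumbering
-- ===== Notes on version B (the rewrite author's own statement) =====
-- stated objective: faster
-- what changed: B builds a prefix prime-count table once (trial division only up to sqrt(k)) and replaces A's full O(n^2) re-count of primes on every pass with an O(1) table lookup per pass.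
import Mathlib
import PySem

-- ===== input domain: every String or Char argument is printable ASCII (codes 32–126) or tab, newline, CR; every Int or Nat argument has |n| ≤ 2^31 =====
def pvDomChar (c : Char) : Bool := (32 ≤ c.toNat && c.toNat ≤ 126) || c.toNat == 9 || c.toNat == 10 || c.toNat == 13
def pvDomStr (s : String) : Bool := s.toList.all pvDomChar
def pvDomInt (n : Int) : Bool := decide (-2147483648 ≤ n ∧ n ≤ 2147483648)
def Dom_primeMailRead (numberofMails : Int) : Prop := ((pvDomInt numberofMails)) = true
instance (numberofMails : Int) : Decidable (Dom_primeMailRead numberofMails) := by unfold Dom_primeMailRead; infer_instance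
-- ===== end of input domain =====

-- B replaces A's full prime re-count on every pass by a prefix prime-count table built
-- once (trial division only up to sqrt) plus an O(1) lookup per pass (objective: faster).

-- ===== PORT A =====
-- inner 'for i in range(2, num): if num % i == 0: break / else: …' — true = the else branch runs
def pvA_trial (num : Int) : List Int → Bool
  | [] => true
  | i :: rest => if PySem.Int.mod num i == 0 then false else pvA_trial num rest

-- one pass of A's outer 'for num in range(1, numberofMails+1)': the value of 'count' afterwards
def pvA_count (numberofMails : Int) : Int :=
  (PySem.List.pyRange 1 (numberofMails + 1) 1).foldl
    (fun count num =>
      if num > 1 then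
        if pvA_trial num (PySem.List.pyRange 2 num 1) then count + 1 else count
      else count) 0

-- termination helper for A's while loop: the pass counts at least the prime 2
theorem pvA_count_step_le (l : List Int) (c : Int) :
    c ≤ l.foldl (fun count num =>
      if num > 1 then
        if pvA_trial num (PySem.List.pyRange 2 num 1) then count + 1 else count
      else count) c := by
  induction l generalizing c with
  | nil => exact le_refl c
  | cons x t ih =>
    refine le_trans ?_ (ih _)
    dsimp only
    split_ifs <;> omega

theorem pvA_count_pos (n : Int) (hn : 1 < n) : 1 ≤ pvA_count n := by
  unfold pvA_count
  rw [PySem.List.pyRange_one_cons (by omega : (1:Int) < n + 1),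
      PySem.List.pyRange_one_cons (by omega : (1:Int) + 1 < n + 1)]
  have h2 : ((1:Int) + 1) = 2 := by norm_num
  rw [h2]
  have htrial : pvA_trial 2 (PySem.List.pyRange 2 2 1) = true := by decide
  simp only [List.foldl_cons]
  norm_num
  rw [show pvA_trial 2 ([] : List Int) = true from rfl]
  norm_num
  exact pvA_count_step_le _ 1

def pvA_loop (numberofMails renumbering : Int) : Int :=
  if numberofMails > 1 then
    pvA_loop (numberofMails - pvA_count numberofMails) (renumbering + 1)
  else renumbering
termination_by numberofMails.toNat
decreasing_by
  have := pvA_count_pos numberofMails (by omega)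
  omega

def primeMailRead (numberofMails : Int) : Int := pvA_loop numberofMails 1

-- ===== PORT B =====
-- helper for the termination of the 'while i * i <= k' loop
theorem pv_le_of_sq_le (i k : Int) (h : i * i ≤ k) : i ≤ k := by
  by_cases hi : i ≤ 0
  · have := mul_self_nonneg i
    linarith
  · have : i * 1 ≤ i * i := mul_le_mul_of_nonneg_left (by omega) (by omega)
    linarith

-- 'i = 2; while i*i <= k: if k % i == 0: is_p = False; break; i += 1' — returns is_p
def pvB_sqrtTrial (k i : Int) : Bool :=
  if h : i * i ≤ k then
    if PySem.Int.mod k i == 0 then false else pvB_sqrtTrial k (i + 1)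
  else true
termination_by (k + 1 - i).toNat
decreasing_by
  have := pv_le_of_sq_le i k h
  omega

-- the 'for k in range(2, n+1)' table-building loop; state = (pi, cnt)
def pvB_build (n : Int) : List Int × Int :=
  (PySem.List.pyRange 2 (n + 1) 1).foldl
    (fun (st : List Int × Int) k =>
      let cnt' := if pvB_sqrtTrial k 2 then st.2 + 1 else st.2
      (st.1 ++ [cnt'], cnt'))
    ([0, 0], 0)

-- the final 'while n > 1' loop with 'n = n - pi[n]'; fuel bounds the iteration count
-- (proved sufficient below); the 'none' arm is Python's IndexError, shown unreachable
def pvB_loop (pi : List Int) : Nat → Int → Int → Int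
  | 0, _, renumbering => renumbering
  | fuel + 1, n, renumbering =>
    if n > 1 then
      match PySem.List.pyGet? pi n with
      | some v => pvB_loop pi fuel (n - v) (renumbering + 1)
      | none => renumbering
    else renumbering

def primeMailRead_alt (numberofMails : Int) : Int :=
  if numberofMails ≤ 1 then 1
  else pvB_loop (pvB_build numberofMails).1 numberofMails.toNat numberofMails 1

-- ===== PRECONDITION & SPEC =====
def Spec_primeMailRead (numberofMails : Int) (out : Int) : Prop := out = primeMailRead_alt numberofMails
instance (numberofMails : Int) (out : Int) : Decidable (Spec_primeMailRead numberofMails out) := by unfold Spec_primeMailRead; infer_instance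

-- ===== CLAIM (what is proved, stated in full; the proofs are below) =====
def Claim_equal_primeMailRead : Prop := ∀ (numberofMails : Int), Dom_primeMailRead numberofMails → Spec_primeMailRead numberofMails (primeMailRead numberofMails)

-- ===== LEMMAS AND PROOFS =====

-- A's inner loop is "no divisor in the list"
theorem pvA_trial_iff (num : Int) (l : List Int) :
    pvA_trial num l = true ↔ ∀ i ∈ l, ¬ PySem.Int.mod num i = 0 := by
  induction l with
  | nil => simp [pvA_trial]
  | cons x t ih =>
    unfold pvA_trial
    by_cases hx : PySem.Int.mod num x = 0
    · simp [hx]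
    · simp [hx, ih]

-- B's while loop is "no divisor j ≥ i with j*j ≤ k"  (for 2 ≤ i)
theorem pvB_sqrtTrial_iff (k i : Int) (hi : 2 ≤ i) :
    pvB_sqrtTrial k i = true ↔ ∀ j, i ≤ j → j * j ≤ k → ¬ PySem.Int.mod k j = 0 := by
  unfold pvB_sqrtTrial
  split
  · rename_i h
    by_cases hm : PySem.Int.mod k i = 0
    · simp only [hm]
      simp only [beq_self_eq_true, if_true]
      constructor
      · intro hfalse; cases hfalse
      · intro hall; exact absurd hm (hall i le_rfl h)
    · rw [if_neg (by simpa using hm)]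
      rw [pvB_sqrtTrial_iff k (i + 1) (by omega)]
      constructor
      · intro hall j hij hjj
        rcases eq_or_lt_of_le hij with rfl | hlt
        · exact hm
        · exact hall j (by omega) hjj
      · intro hall j hij hjj
        exact hall j (by omega) hjj
  · rename_i h
    simp only [true_iff]
    intro j hij hjj
    exfalso
    have : i * i ≤ j * j := mul_le_mul hij hij (by omega) (by omega)
    omega
termination_by (k + 1 - i).toNat
decreasing_by
  have := pv_le_of_sq_le i k (by assumption)
  omega

-- divisor below the square root exists iff any proper divisor exists (num ≥ 2)
theorem pv_divfree_iff (num : Int) (h2 : 2 ≤ num) :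
    (∀ i, 2 ≤ i → i < num → ¬ i ∣ num) ↔ (∀ i, 2 ≤ i → i * i ≤ num → ¬ i ∣ num) := by
  constructor
  · intro hall i hi hii
    have : i * 1 < i * i := by
      apply mul_lt_mul_of_pos_left (by omega) (by omega)
    exact hall i hi (by omega)
  · intro hall i hi hilt hdvd
    obtain ⟨q, hq⟩ := hdvd
    have hipos : (0:Int) < i := by omega
    have hqpos : (0:Int) < q := by
      by_contra hle
      push Not at hle
      have : i * q ≤ 0 := mul_nonpos_of_nonneg_of_nonpos (by omega) hle
      omega
    have hq2 : 2 ≤ q := by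
      by_contra hlt
      push Not at hlt
      have hq1 : q = 1 := by omega
      rw [hq1, mul_one] at hq
      omega
    by_cases hle : i * i ≤ num
    · exact hall i hi hle ⟨q, hq⟩
    · have hqi : q < i := by
        by_contra hge
        push Not at hge
        have : i * i ≤ i * q := mul_le_mul_of_nonneg_left hge (by omega)
        omega
      have hqq : q * q ≤ num := by
        have : q * q ≤ q * i := mul_le_mul_of_nonneg_left (by omega) (by omega)
        have h2 : q * i = num := by rw [hq]; ring
        omega
      exact hall q hq2 hqq ⟨i, by rw [hq]; ring⟩

-- the two primality tests agree for num ≥ 2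
theorem pv_trial_eq (num : Int) (h2 : 2 ≤ num) :
    pvA_trial num (PySem.List.pyRange 2 num 1) = pvB_sqrtTrial num 2 := by
  have hA := pvA_trial_iff num (PySem.List.pyRange 2 num 1)
  have hB := pvB_sqrtTrial_iff num 2 le_rfl
  cases hb : pvB_sqrtTrial num 2 with
  | false =>
    rw [hb] at hB
    simp only [Bool.false_eq_true, false_iff, not_forall] at hB
    obtain ⟨j, hj2, hjj, hjm⟩ := hB
    rw [Bool.eq_false_iff, Ne, hA]
    intro hall
    have hlt : j < num := by
      have : j * 1 < j * j := mul_lt_mul_of_pos_left (by omega) (by omega)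
      omega
    exact hjm (hall j (PySem.List.mem_pyRange_one.mpr ⟨hj2, hlt⟩))
  | true =>
    rw [hb] at hB
    replace hB := hB.mp rfl
    rw [hA]
    intro i hi
    rw [PySem.List.mem_pyRange_one] at hi
    rw [PySem.Int.mod_eq_zero_iff_dvd]
    refine (pv_divfree_iff num h2).mpr ?_ i hi.1 hi.2
    intro j hj hjj
    rw [← PySem.Int.mod_eq_zero_iff_dvd]
    exact hB j hj hjj

-- pvA_count extends by one range element
theorem pvA_count_succ (n : Int) (hn : 0 ≤ n) :
    pvA_count (n + 1) =
      pvA_count n +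
        (if n + 1 > 1 then
          (if pvA_trial (n + 1) (PySem.List.pyRange 2 (n + 1) 1) then 1 else 0)
        else 0) := by
  unfold pvA_count
  have : (PySem.List.pyRange 1 (n + 1 + 1) 1) = PySem.List.pyRange 1 (n + 1) 1 ++ [n + 1] :=
    PySem.List.pyRange_one_succ_right (by omega)
  rw [this, List.foldl_append]
  simp only [List.foldl_cons, List.foldl_nil]
  split_ifs <;> omega

-- the table built for n is [pvA_count 0, pvA_count 1, …, pvA_count n]
theorem pvB_build_spec (n : Int) (hn : 1 ≤ n) :
    (pvB_build n).1 = (List.range (n.toNat + 1)).map (fun k : Nat => pvA_count (k : Int)) ∧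
      (pvB_build n).2 = pvA_count n := by
  induction n, hn using Int.le_induction with
  | base => decide
  | succ m hm ih =>
    have hstep : pvB_build (m + 1) =
        (let cnt' := if pvB_sqrtTrial (m + 1) 2 then (pvB_build m).2 + 1 else (pvB_build m).2
         ((pvB_build m).1 ++ [cnt'], cnt')) := by
      unfold pvB_build
      rw [PySem.List.pyRange_one_succ_right (by omega : (2:Int) ≤ m + 1), List.foldl_append]
      simp
    have hcnt : (if pvB_sqrtTrial (m + 1) 2 then (pvB_build m).2 + 1 else (pvB_build m).2)
        = pvA_count (m + 1) := by
      rw [ih.2, ← pv_trial_eq (m + 1) (by omega),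
          pvA_count_succ m (by omega), if_pos (by omega : m + 1 > 1)]
      split_ifs <;> omega
    rw [hstep]
    refine ⟨?_, by simpa using hcnt⟩
    simp only [hcnt, ih.1]
    have htn : (m + 1).toNat + 1 = (m.toNat + 1) + 1 := by omega
    have h2 : ((m.toNat + 1 : Nat) : Int) = m + 1 := by omega
    simp only [htn, List.range_succ, List.map_append, List.map_cons, List.map_nil,
      List.append_assoc, h2]

-- table lookup is exact for 0 ≤ k ≤ n
theorem pvB_lookup (n k : Int) (hn : 1 ≤ n) (hk0 : 0 ≤ k) (hkn : k ≤ n) :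
    PySem.List.pyGet? (pvB_build n).1 k = some (pvA_count k) := by
  rw [(pvB_build_spec n hn).1, PySem.List.pyGet?_of_nonneg _ hk0]
  rw [List.getElem?_map, List.getElem?_range (by omega : k.toNat < n.toNat + 1)]
  simp [Int.toNat_of_nonneg hk0]

-- with a correct table and enough fuel, B's lookup loop is A's recount loop
theorem pv_loop_eq (n0 : Int) (hn0 : 1 ≤ n0) :
    ∀ (fuel : Nat) (n ren : Int), n ≤ n0 → n.toNat ≤ fuel →
      pvB_loop (pvB_build n0).1 fuel n ren = pvA_loop n ren := by
  intro fuel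
  induction fuel with
  | zero =>
    intro n ren _ hf
    rw [pvA_loop]
    rw [if_neg (by omega)]
    rfl
  | succ f ih =>
    intro n ren hn hf
    rw [pvA_loop]
    unfold pvB_loop
    by_cases h1 : n > 1
    · rw [if_pos h1, if_pos h1, pvB_lookup n0 n hn0 (by omega) hn]
      have hc := pvA_count_pos n h1
      exact ih (n - pvA_count n) (ren + 1) (by omega) (by omega)
    · rw [if_neg h1, if_neg h1]

-- ===== VERDICT (by name: the statement is the Claim_ definition above) =====
theorem primeMailRead_spec : Claim_equal_primeMailRead := by
  intro n _
  unfold Spec_primeMailRead primeMailRead primeMailRead_alt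
  by_cases h : n ≤ 1
  · rw [if_pos h, pvA_loop, if_neg (by omega)]
  · rw [if_neg h, pv_loop_eq n (by omega) n.toNat n 1 le_rfl le_rfl]
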